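-- pv_equiv track=rewrite | github.com/scidex/shapley-analysis-exercise | src/utils.py | order_templates
-- ===== SOURCE A (Python) =====
-- def order_templates(templates_loaded, labels_loaded):
--     class_template_mapping = {}
--
--     for t, c in zip(templates_loaded, labels_loaded):
--         if c not in class_template_mapping.keys():
--             class_template_mapping[c] = []
--
--         for template in t:
--             class_template_mapping[c].append(template)
--     return class_template_mapping
-- ===== SOURCE B (Python) =====
-- def order_templates(templates_loaded, labels_loaded):
--     pairs = list(zip(templates_loaded, labels_loaded))
--     classes = dict.fromkeys(l for _, l in pairs)
--     return {c: [x for t, l in pairs if l == c for x in t] for c in classes}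
-- ===== Notes on version B (the rewrite author's own statement) =====
-- stated objective: alternative
-- what changed: Replaces A's single incremental grouping pass that mutates a dict per pair with an index-keys-first decomposition: compute the distinct labels in first-appearance order via dict.fromkeys, then build the result as a dict comprehension whose value per class is one flattening scan of all (template, label) pairs.
import Mathlib
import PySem

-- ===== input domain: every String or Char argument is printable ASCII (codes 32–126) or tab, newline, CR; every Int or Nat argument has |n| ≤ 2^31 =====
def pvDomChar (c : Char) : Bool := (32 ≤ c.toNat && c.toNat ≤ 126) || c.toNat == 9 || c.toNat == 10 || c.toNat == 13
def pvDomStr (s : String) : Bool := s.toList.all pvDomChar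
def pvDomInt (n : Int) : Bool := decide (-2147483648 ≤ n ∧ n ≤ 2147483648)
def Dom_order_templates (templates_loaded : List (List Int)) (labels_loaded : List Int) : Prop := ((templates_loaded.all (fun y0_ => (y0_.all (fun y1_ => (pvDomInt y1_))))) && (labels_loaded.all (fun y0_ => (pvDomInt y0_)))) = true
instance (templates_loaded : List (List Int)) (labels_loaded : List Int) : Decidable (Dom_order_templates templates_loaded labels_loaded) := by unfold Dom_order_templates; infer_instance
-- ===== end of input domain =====

-- B groups by computing the distinct class labels first (dict.fromkeys order) and then
-- doing one flattening scan of the (template, label) pairs per class, instead of A's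
-- single incremental dict-mutating pass; same return value, no speed claim.


-- ===== PORT A =====
-- one iteration of A's `for t, c in zip(...)` body
def pvStepA (d : PySem.Dict Int (List Int)) (p : List Int × Int) : PySem.Dict Int (List Int) :=
  let d1 := if d.contains p.2 then d else d.insert p.2 []   -- if c not in mapping: mapping[c] = []
  p.1.foldl (fun dd x => dd.modify p.2 [] (fun l => l ++ [x])) d1   -- for template in t: mapping[c].append(template)

def order_templates (templates_loaded : List (List Int)) (labels_loaded : List Int) : List (Int × List Int) :=
  ((templates_loaded.zip labels_loaded).foldl pvStepA PySem.Dict.empty).items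

-- ===== PORT B =====
-- [x for t, l in pairs if l == c for x in t]
def pvGroupB (pairs : List (List Int × Int)) (c : Int) : List Int :=
  ((pairs.filter (fun p => p.2 == c)).map (·.1)).flatten

def order_templates_alt (templates_loaded : List (List Int)) (labels_loaded : List Int) : List (Int × List Int) :=
  let pairs := templates_loaded.zip labels_loaded
  let classes := PySem.List.dedup (pairs.map (·.2))
  classes.map (fun c => (c, pvGroupB pairs c))

-- ===== PRECONDITION & SPEC =====
def Spec_order_templates (templates_loaded : List (List Int)) (labels_loaded : List Int) (out : List (Int × List Int)) : Prop := out = order_templates_alt templates_loaded labels_loaded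
instance (templates_loaded : List (List Int)) (labels_loaded : List Int) (out : List (Int × List Int)) : Decidable (Spec_order_templates templates_loaded labels_loaded out) := by unfold Spec_order_templates; infer_instance

-- ===== CLAIM (what is proved, stated in full; the proofs are below) =====
def Claim_equal_order_templates : Prop := ∀ (templates_loaded : List (List Int)) (labels_loaded : List Int), Dom_order_templates templates_loaded labels_loaded → Spec_order_templates templates_loaded labels_loaded (order_templates templates_loaded labels_loaded)

-- ===== LEMMAS AND PROOFS =====

-- the inner append loop, seen through getD with default []
theorem pv_getD_inner (t : List Int) (k : Int) (d : PySem.Dict Int (List Int)) (c : Int) :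
    (t.foldl (fun dd x => dd.modify k [] (fun l => l ++ [x])) d).getD c []
      = if c = k then d.getD c [] ++ t else d.getD c [] := by
  induction t generalizing d with
  | nil => simp
  | cons x t ih =>
      simp only [List.foldl_cons, ih, PySem.Dict.getD_modify]
      split_ifs with h
      · subst h; simp
      · rfl

theorem pv_getD_stepA (d : PySem.Dict Int (List Int)) (p : List Int × Int) (c : Int) :
    (pvStepA d p).getD c [] = if c = p.2 then d.getD c [] ++ p.1 else d.getD c [] := by
  unfold pvStepA
  rw [pv_getD_inner]
  by_cases hc : d.contains p.2
  · simp [hc]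
  · simp only [Bool.not_eq_true] at hc
    simp only [hc, Bool.false_eq_true, if_false]
    rw [PySem.Dict.getD_insert]
    split_ifs with h1
    · subst h1; rw [PySem.Dict.getD_of_not_contains d [] hc]
    · rfl

theorem pv_getD_fold (L : List (List Int × Int)) (d : PySem.Dict Int (List Int)) (c : Int) :
    (L.foldl pvStepA d).getD c [] = d.getD c [] ++ pvGroupB L c := by
  induction L generalizing d with
  | nil => simp [pvGroupB]
  | cons p L ih =>
      simp only [List.foldl_cons, ih, pv_getD_stepA, pvGroupB, List.filter_cons]
      by_cases h : p.2 = c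
      · simp [h, List.append_assoc]
      · have : (p.2 == c) = false := by simp [h]
        simp [this, Ne.symm h]

theorem pv_keys_stepA (d : PySem.Dict Int (List Int)) (p : List Int × Int) :
    (pvStepA d p).keys = PySem.Set.add d.keys p.2 := by
  unfold pvStepA
  have hinner : ∀ (t : List Int) (dd : PySem.Dict Int (List Int)), dd.contains p.2 = true →
      (t.foldl (fun dd x => dd.modify p.2 [] (fun l => l ++ [x])) dd).keys = dd.keys := by
    intro t
    induction t with
    | nil => intro dd _; rfl
    | cons x t ih =>
        intro dd hdd
        simp only [List.foldl_cons]
        rw [ih]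
        · rw [PySem.Dict.keys_modify, PySem.Dict.keys_insert_of_contains _ _ hdd]
        · rw [PySem.Dict.contains_modify]; simp [hdd]
  by_cases hc : d.contains p.2
  · rw [if_pos hc, hinner _ _ hc, PySem.Set.add_of_mem]
    exact (PySem.Dict.contains_iff_mem_keys d p.2).mp hc
  · simp only [Bool.not_eq_true] at hc
    rw [if_neg (by simp [hc]), hinner, PySem.Dict.keys_insert_of_not_contains _ _ hc,
        PySem.Set.add_of_not_mem]
    · intro hmem; exact absurd ((PySem.Dict.contains_iff_mem_keys d p.2).mpr hmem) (by simp [hc])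
    · exact PySem.Dict.contains_insert_self d p.2 []

theorem pv_keys_fold (L : List (List Int × Int)) (d : PySem.Dict Int (List Int)) :
    (L.foldl pvStepA d).keys = PySem.Set.update d.keys (L.map (·.2)) := by
  rw [PySem.Set.update_map_eq_foldl_add]
  induction L generalizing d with
  | nil => rfl
  | cons p L ih => simp only [List.foldl_cons, ih, pv_keys_stepA]

-- ===== VERDICT (by name: the statement is the Claim_ definition above) =====
theorem order_templates_spec : Claim_equal_order_templates := by
  intro tl ll _
  unfold Spec_order_templates order_templates order_templates_alt
  have hkeys : ((tl.zip ll).foldl pvStepA PySem.Dict.empty).keys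
      = PySem.Set.ofList ((tl.zip ll).map (·.2)) := by
    rw [pv_keys_fold]
    have : (PySem.Dict.empty : PySem.Dict Int (List Int)).keys = PySem.Set.empty := rfl
    rw [this, PySem.Set.update_empty]
  rw [PySem.Dict.items_eq_map_keys _ (by rw [hkeys]; exact PySem.Set.nodup_ofList _) [],
      hkeys]
  simp only [PySem.List.dedup_eq_ofList]
  refine List.map_congr_left (fun c _ => ?_)
  rw [pv_getD_fold, PySem.Dict.getD_empty]
  rfl
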